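-- pv_equiv track=rewrite | github.com/TeamW-P/RNABayesPairing2 | core/src/make_BN_from_carnaval.py | get_real_size
-- ===== SOURCE A (Python) =====
-- def get_real_size(pos):
--     real_size = 0
--     for ind,node in enumerate(pos):
--         if ind==0:
--             continue
--         if 1<node-pos[ind-1]<5:
--             real_size=+node-pos[ind-1]
--     return real_size
-- ===== SOURCE B (Python) =====
-- def get_real_size(pos):
--     for prev, cur in reversed(list(zip(pos, pos[1:]))):
--         gap = cur - prev
--         if 1 < gap < 5:
--             return gap
--     return 0
-- ===== Notes on version B (the rewrite author's own statement) =====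
-- stated objective: simpler
-- what changed: A scans forward over enumerate, overwriting an accumulator with each qualifying gap; B scans the consecutive pairs backwards and returns the first qualifying gap (the same last-qualifying gap) immediately, with no accumulator.
import Mathlib
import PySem

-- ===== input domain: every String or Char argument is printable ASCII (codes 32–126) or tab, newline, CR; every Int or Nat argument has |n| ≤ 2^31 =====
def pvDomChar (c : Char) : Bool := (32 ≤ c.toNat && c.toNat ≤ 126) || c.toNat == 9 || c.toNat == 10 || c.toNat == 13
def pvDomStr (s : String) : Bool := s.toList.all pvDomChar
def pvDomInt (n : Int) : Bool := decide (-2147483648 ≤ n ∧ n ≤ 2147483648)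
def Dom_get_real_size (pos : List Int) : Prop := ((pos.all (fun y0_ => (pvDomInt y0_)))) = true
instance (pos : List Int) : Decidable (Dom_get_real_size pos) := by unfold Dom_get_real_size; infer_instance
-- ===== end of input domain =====

-- B replaces A's forward scan with an overwritten accumulator by a reverse scan over the
-- consecutive pairs that returns the first (i.e. last-in-order) qualifying gap immediately.

-- ===== PORT A =====
-- forward loop over enumerate(pos); ind == 0 is skipped; each qualifying gap overwrites real_size
def get_real_size (pos : List Int) : Int :=
  (PySem.List.enumerate pos 0).foldl
    (fun real_size p =>
      if p.1 == 0 then real_size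
      else
        let prev := PySem.List.pyGetD pos (p.1 - 1) 0   -- pos[ind-1]; ind ≥ 1, so always in range
        if 1 < p.2 - prev ∧ p.2 - prev < 5 then p.2 - prev else real_size)
    0

-- ===== PORT B =====
-- recursion over reversed(list(zip(pos, pos[1:]))): first qualifying gap wins
def grsGo : List (Int × Int) → Int
  | [] => 0
  | (prev, cur) :: rest =>
      if 1 < cur - prev ∧ cur - prev < 5 then cur - prev else grsGo rest

def get_real_size_alt (pos : List Int) : Int :=
  grsGo ((pos.zip (PySem.List.slice pos (some 1) none)).reverse)

-- ===== PRECONDITION & SPEC =====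
def Spec_get_real_size (pos : List Int) (out : Int) : Prop := out = get_real_size_alt pos
instance (pos : List Int) (out : Int) : Decidable (Spec_get_real_size pos out) := by unfold Spec_get_real_size; infer_instance

-- ===== CLAIM (what is proved, stated in full; the proofs are below) =====
def Claim_equal_get_real_size : Prop := ∀ (pos : List Int), Dom_get_real_size pos → Spec_get_real_size pos (get_real_size pos)

-- ===== LEMMAS AND PROOFS =====

-- shared step function: overwrite the accumulator with a qualifying gap
def grsStep (acc : Int) (p : Int × Int) : Int :=
  if 1 < p.2 - p.1 ∧ p.2 - p.1 < 5 then p.2 - p.1 else acc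

-- grsGo with an explicit default accumulator
def grsGoD : List (Int × Int) → Int → Int
  | [], d => d
  | (prev, cur) :: rest, d =>
      if 1 < cur - prev ∧ cur - prev < 5 then cur - prev else grsGoD rest d

theorem grsGoD_zero (l : List (Int × Int)) : grsGoD l 0 = grsGo l := by
  induction l with
  | nil => rfl
  | cons p rest ih => obtain ⟨a, b⟩ := p; simp [grsGoD, grsGo, ih]

-- forward overwrite-fold = reverse first-match
theorem foldl_step_eq_grsGoD (l : List (Int × Int)) (acc : Int) :
    l.foldl grsStep acc = grsGoD l.reverse acc := by
  induction l using List.reverseRecOn generalizing acc with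
  | nil => rfl
  | append_singleton l x ih =>
      obtain ⟨a, b⟩ := x
      simp [List.foldl_append, grsGoD, grsStep]
      split_ifs with h
      · rfl
      · exact ih acc

-- A's enumerate fold, started after a non-empty prefix, equals the pair fold
theorem enum_fold_eq (xs : List Int) : ∀ (pre : List Int) (x : Int) (acc : Int),
    (PySem.List.enumerate xs ((pre.length : Int) + 1)).foldl
      (fun real_size p =>
        if p.1 == 0 then real_size
        else
          let prev := PySem.List.pyGetD (pre ++ x :: xs) (p.1 - 1) 0
          if 1 < p.2 - prev ∧ p.2 - prev < 5 then p.2 - prev else real_size)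
      acc
    = ((x :: xs).zip xs).foldl grsStep acc := by
  induction xs with
  | nil => intro pre x acc; rfl
  | cons y ys ih =>
      intro pre x acc
      rw [PySem.List.enumerate_cons]
      simp only [List.foldl_cons, List.zip_cons_cons]
      have h0 : (((pre.length : Int) + 1) == 0) = false := by
        simp; omega
      have hget : PySem.List.pyGetD (pre ++ x :: y :: ys) ((pre.length : Int) + 1 - 1) 0 = x := by
        simp [PySem.List.pyGetD_natCast]
      simp only [h0, Bool.false_eq_true, if_false, hget]
      have hidx : (pre.length : Int) + 1 + 1 = ((pre ++ [x]).length : Int) + 1 := by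
        simp
      rw [hidx]
      have hrec := ih (pre ++ [x]) y (grsStep acc (x, y))
      simp only [List.append_assoc, List.cons_append, List.nil_append] at hrec
      rw [show (if 1 < y - x ∧ y - x < 5 then y - x else acc) = grsStep acc (x, y) from rfl]
      exact hrec

-- A as a fold of grsStep over the consecutive pairs
theorem get_real_size_eq_pairs (pos : List Int) :
    get_real_size pos = ((pos.zip pos.tail).foldl grsStep 0) := by
  cases pos with
  | nil => rfl
  | cons x xs =>
      have h := enum_fold_eq xs [] x 0
      simp only [List.length_nil, Nat.cast_zero, zero_add, List.nil_append] at h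
      unfold get_real_size
      rw [PySem.List.enumerate_cons]
      simp only [List.foldl_cons, List.tail_cons]
      norm_num
      convert h using 2
      simp [beq_iff_eq]

-- ===== VERDICT (by name: the statement is the Claim_ definition above) =====
theorem get_real_size_spec : Claim_equal_get_real_size := by
  intro pos _
  unfold Spec_get_real_size get_real_size_alt
  rw [PySem.List.slice_from_one, ← grsGoD_zero, ← foldl_step_eq_grsGoD,
    get_real_size_eq_pairs]
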